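-- pv_equiv track=rewrite | github.com/violll/projectEuler | pandigitalProducts.py | hasUniqueDigits
-- ===== SOURCE A (Python) =====
-- def hasUniqueDigits(num):
--     res = set()
--     while num >= 1:
--         digit = num % 10
--         if digit in res: return False
--         else: res.add(digit)
--         num = num//10
--     return True
-- ===== SOURCE B (Python) =====
-- def hasUniqueDigits(num):
--     # Decimal-string route: no arithmetic digit extraction at all.
--     if num < 1:
--         return True
--     s = str(num)
--     return len(set(s)) == len(s)
-- ===== Notes on version B (the rewrite author's own statement) =====
-- stated objective: idiomatic
-- what changed: B converts the number to its decimal string and decides distinctness by the single comparison len(set(s)) == len(s), replacing A's arithmetic mod//div digit-extraction loop with incremental set membership and early return; non-positive inputs are guarded first because A's loop never executes there.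
import Mathlib
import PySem

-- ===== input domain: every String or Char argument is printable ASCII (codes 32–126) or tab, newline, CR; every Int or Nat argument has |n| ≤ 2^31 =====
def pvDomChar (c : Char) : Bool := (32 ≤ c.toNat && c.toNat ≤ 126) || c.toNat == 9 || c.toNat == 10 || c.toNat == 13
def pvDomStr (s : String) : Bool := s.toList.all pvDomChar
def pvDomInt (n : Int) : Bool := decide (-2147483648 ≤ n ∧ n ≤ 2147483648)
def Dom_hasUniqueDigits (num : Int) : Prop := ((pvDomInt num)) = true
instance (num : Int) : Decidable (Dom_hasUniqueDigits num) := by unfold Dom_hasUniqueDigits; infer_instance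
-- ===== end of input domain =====

-- B takes the decimal-string route: s = str(num), distinct iff len(set(s)) == len(s);
-- no arithmetic digit extraction (idiomatic rewrite; same asymptotic cost).

-- ===== PORT A =====
-- A's while loop: extract digits by mod/div, early-return False on a repeated digit.
def hasUniqueDigitsGo (num : Int) (res : PySem.Set Int) : Bool :=
  if h : 1 ≤ num then
    let digit := PySem.Int.mod num 10
    if res.contains digit then false
    else hasUniqueDigitsGo (PySem.Int.floordiv num 10) (res.add digit)
  else true
termination_by num.toNat
decreasing_by
  have : PySem.Int.floordiv num 10 = num / 10 := PySem.Int.floordiv_eq_ediv_of_pos (by norm_num)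
  rw [this]; omega

def hasUniqueDigits (num : Int) : Bool := hasUniqueDigitsGo num PySem.Set.empty

-- ===== PORT B =====
def hasUniqueDigits_alt (num : Int) : Bool :=
  if num < 1 then true
  else
    let s := PySem.Int.toStr num
    PySem.Set.len (PySem.Set.ofList s.toList) == PySem.Str.len s

-- ===== PRECONDITION & SPEC =====
def Spec_hasUniqueDigits (num : Int) (out : Bool) : Prop := out = hasUniqueDigits_alt num
instance (num : Int) (out : Bool) : Decidable (Spec_hasUniqueDigits num out) := by unfold Spec_hasUniqueDigits; infer_instance

-- ===== CLAIM (what is proved, stated in full; the proofs are below) =====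
def Claim_equal_hasUniqueDigits : Prop := ∀ (num : Int), Dom_hasUniqueDigits num → Spec_hasUniqueDigits num (hasUniqueDigits num)

-- ===== LEMMAS AND PROOFS =====

-- the digit list A's loop walks through (proof-only helper)
def pvIntDigits (num : Int) : List Int :=
  if h : 1 ≤ num then
    PySem.Int.mod num 10 :: pvIntDigits (PySem.Int.floordiv num 10)
  else []
termination_by num.toNat
decreasing_by
  have : PySem.Int.floordiv num 10 = num / 10 := PySem.Int.floordiv_eq_ediv_of_pos (by norm_num)
  rw [this]; omega

-- length of a set built by repeated add is at most start + number added
theorem pv_foldl_add_length_le {α : Type} [BEq α] [LawfulBEq α] (xs : List α) :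
    ∀ (s : PySem.Set α), (xs.foldl PySem.Set.add s).length ≤ s.length + xs.length := by
  induction xs with
  | nil => intro s; simp
  | cons x xs ih =>
    intro s
    simp only [List.foldl_cons]
    have := ih (s.add x)
    have hadd : (PySem.Set.add s x).length ≤ s.length + 1 := by
      unfold PySem.Set.add
      split <;> simp
    simp only [List.length_cons]
    omega

-- the fold loses no length exactly when the added elements are fresh and distinct
theorem pv_foldl_add_length_eq_iff {α : Type} [BEq α] [LawfulBEq α] (xs : List α) :
    ∀ (s : PySem.Set α),
    (xs.foldl PySem.Set.add s).length = s.length + xs.length ↔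
      ((∀ x ∈ xs, x ∉ s) ∧ xs.Nodup) := by
  induction xs with
  | nil => intro s; simp
  | cons x xs ih =>
    intro s
    simp only [List.foldl_cons, List.length_cons, List.mem_cons, List.nodup_cons,
      forall_eq_or_imp]
    by_cases hx : x ∈ s
    · have hc : PySem.Set.add s x = s := by
        unfold PySem.Set.add
        simp [List.contains_eq_mem, hx]
      rw [hc]
      constructor
      · intro hl
        have := pv_foldl_add_length_le xs s
        omega
      · rintro ⟨⟨hxs, -⟩, -⟩
        exact absurd hx hxs
    · have hc : PySem.Set.add s x = s ++ [x] := by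
        unfold PySem.Set.add
        simp only [PySem.Set.contains, List.contains_eq_mem, hx, decide_false,
          Bool.false_eq_true, if_false]
      rw [hc]
      have h2 := ih (s ++ [x])
      simp only [List.length_append, List.length_singleton, List.mem_append,
        List.mem_singleton] at h2
      constructor
      · intro hl
        obtain ⟨hfresh, hnd⟩ := h2.mp (by omega)
        refine ⟨⟨hx, fun y hy hys => (hfresh y hy) (Or.inl hys)⟩,
          fun hxxs => (hfresh x hxxs) (Or.inr rfl), hnd⟩
      · rintro ⟨⟨-, hfresh⟩, hxxs, hnd⟩
        have : (List.foldl PySem.Set.add (s ++ [x]) xs).length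
            = s.length + 1 + xs.length := by
          refine h2.mpr ⟨fun y hy => ?_, hnd⟩
          rintro (hys | rfl)
          · exact (hfresh y hy) hys
          · exact hxxs hy
        omega

-- len(set(xs)) == len(xs) decides Nodup
theorem pv_ofList_len_eq_iff {α : Type} [BEq α] [LawfulBEq α] (xs : List α) :
    (PySem.Set.ofList xs).length = xs.length ↔ xs.Nodup := by
  rw [PySem.Set.ofList_eq_foldl]
  have h := pv_foldl_add_length_eq_iff xs ([] : PySem.Set α)
  simp only [List.length_nil, List.not_mem_nil, not_false_iff, imp_true_iff,
    true_and, zero_add] at h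
  exact h

-- A's loop computes: digits so far are nodup and avoid the accumulated set
theorem pv_loop_eq (num : Int) (res : PySem.Set Int) :
    hasUniqueDigitsGo num res =
      (decide (pvIntDigits num).Nodup &&
        (pvIntDigits num).all (fun d => !(res.contains d))) := by
  unfold hasUniqueDigitsGo pvIntDigits
  by_cases h : 1 ≤ num
  · simp only [dif_pos h]
    by_cases hc : res.contains (PySem.Int.mod num 10)
    · have hm : num % 10 ∈ (res : List Int) := by
        have he : PySem.Int.mod num 10 = num % 10 := PySem.Int.mod_eq_emod_of_pos (by norm_num)
        simp only [PySem.Set.contains, List.contains_eq_mem, he, decide_eq_true_eq] at hc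
        exact hc
      simp [hm]
    · simp only [hc, Bool.false_eq_true, if_false]
      rw [pv_loop_eq (PySem.Int.floordiv num 10) (res.add (PySem.Int.mod num 10))]
      rw [Bool.eq_iff_iff]
      simp only [Bool.and_eq_true, decide_eq_true_iff, List.all_cons, List.all_eq_true,
        Bool.not_eq_true', List.nodup_cons, PySem.Set.mem_add,
        PySem.Set.contains, List.contains_eq_mem, decide_eq_false_iff_not]
      have hcm : PySem.Int.mod num 10 ∉ (res : List Int) := by
        intro hm
        exact hc (by simpa [PySem.Set.contains, List.contains_eq_mem] using hm)
      constructor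
      · rintro ⟨hnd, hall⟩
        refine ⟨⟨fun hm => (hall _ hm) (Or.inr rfl), hnd⟩, hcm, fun x hx => fun hxs => (hall x hx) (Or.inl hxs)⟩
      · rintro ⟨⟨hdm, hnd⟩, -, hall⟩
        refine ⟨hnd, fun x hx => ?_⟩
        rintro (hxs | rfl)
        · exact hall x hx hxs
        · exact hdm hx
  · simp [h]
termination_by num.toNat
decreasing_by
  have : PySem.Int.floordiv num 10 = num / 10 := PySem.Int.floordiv_eq_ediv_of_pos (by norm_num)
  rw [this]; omega

-- A's digit list is the cast of Nat.digits 10 of the number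
theorem pv_intDigits_eq_digits (num : Int) :
    pvIntDigits num = (Nat.digits 10 num.toNat).map (fun d : Nat => (d : Int)) := by
  unfold pvIntDigits
  by_cases h : 1 ≤ num
  · simp only [dif_pos h]
    have hfd : PySem.Int.floordiv num 10 = num / 10 :=
      PySem.Int.floordiv_eq_ediv_of_pos (by norm_num)
    have hmd : PySem.Int.mod num 10 = num % 10 :=
      PySem.Int.mod_eq_emod_of_pos (by norm_num)
    rw [pv_intDigits_eq_digits (PySem.Int.floordiv num 10)]
    have hpos : 0 < num.toNat := by omega
    rw [Nat.digits_def' (by norm_num : (1:ℕ) < 10) hpos]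
    have h1 : PySem.Int.mod num 10 = ((num.toNat % 10 : Nat) : Int) := by
      rw [hmd]; omega
    have h2 : (PySem.Int.floordiv num 10).toNat = num.toNat / 10 := by
      rw [hfd]; omega
    rw [h1, h2]
    simp
  · simp only [dif_neg h]
    have : num.toNat = 0 := by omega
    simp [this]
termination_by num.toNat
decreasing_by
  have : PySem.Int.floordiv num 10 = num / 10 := PySem.Int.floordiv_eq_ediv_of_pos (by norm_num)
  rw [this]; omega

-- Nat.toDigitsCore with enough fuel writes the reversed digit list
theorem pv_toDigitsCore_eq (fuel : Nat) :
    ∀ (n : Nat) (ds : List Char), n < fuel → 0 < n →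
    Nat.toDigitsCore 10 fuel n ds =
      ((Nat.digits 10 n).map Nat.digitChar).reverse ++ ds := by
  induction fuel with
  | zero => intro n ds h1 h2; omega
  | succ f ih =>
    intro n ds h1 h2
    simp only [Nat.toDigitsCore]
    rw [Nat.digits_def' (by norm_num : (1:ℕ) < 10) h2]
    by_cases hq : n / 10 = 0
    · simp [hq]
    · simp only [hq, if_false]
      have hlt : n / 10 < f := by
        have := Nat.div_lt_self h2 (by norm_num : 1 < 10)
        omega
      rw [ih (n / 10) (Nat.digitChar (n % 10) :: ds) hlt (Nat.pos_of_ne_zero hq)]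
      simp

-- str(num) for num ≥ 1, as a char list
theorem pv_toChars_eq (num : Int) (h : 1 ≤ num) :
    PySem.Int.toChars num = ((Nat.digits 10 num.toNat).map Nat.digitChar).reverse := by
  unfold PySem.Int.toChars
  rw [if_neg (by omega)]
  unfold Nat.toDigits
  rw [pv_toDigitsCore_eq (num.toNat + 1) num.toNat [] (by omega) (by omega)]
  simp

-- digitChar is injective on digits < 10
theorem pv_digitChar_inj (a b : Nat) (ha : a < 10) (hb : b < 10)
    (h : Nat.digitChar a = Nat.digitChar b) : a = b := by
  interval_cases a <;> interval_cases b <;> simp_all [Nat.digitChar]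

-- nodup of the char list iff nodup of the digit list
theorem pv_chars_nodup_iff (n : Nat) :
    ((Nat.digits 10 n).map Nat.digitChar).Nodup ↔ (Nat.digits 10 n).Nodup := by
  constructor
  · exact List.Nodup.of_map _
  · intro hnd
    refine List.Nodup.map_on ?_ hnd
    intro a ha b hb h
    exact pv_digitChar_inj a b (Nat.digits_lt_base (by norm_num) ha)
      (Nat.digits_lt_base (by norm_num) hb) h

-- ===== VERDICT (by name: the statement is the Claim_ definition above) =====
theorem hasUniqueDigits_spec : Claim_equal_hasUniqueDigits := by
  intro num _
  unfold Spec_hasUniqueDigits hasUniqueDigits hasUniqueDigits_alt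
  by_cases h : num < 1
  · rw [if_pos h]
    unfold hasUniqueDigitsGo
    rw [dif_neg (by omega)]
  · rw [if_neg h]
    rw [pv_loop_eq num PySem.Set.empty]
    have hns : (PySem.Int.toStr num).toList = PySem.Int.toChars num :=
      PySem.Int.toList_toStr num
    have hkey : (pvIntDigits num).Nodup ↔ (PySem.Int.toChars num).Nodup := by
      rw [pv_intDigits_eq_digits num, pv_toChars_eq num (by omega), List.nodup_reverse,
        pv_chars_nodup_iff]
      exact ⟨List.Nodup.of_map _, List.Nodup.map (fun a b hab => by exact_mod_cast hab)⟩
    simp only [PySem.Set.len, PySem.Str.len_eq, hns]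
    rw [Bool.eq_iff_iff]
    simp only [Bool.and_eq_true, decide_eq_true_iff, List.all_eq_true, beq_iff_eq,
      Nat.cast_inj]
    constructor
    · rintro ⟨hnd, -⟩
      rw [(pv_ofList_len_eq_iff _).mpr (hkey.mp hnd)]
    · intro hlen
      have hnd := hkey.mpr ((pv_ofList_len_eq_iff _).mp hlen)
      refine ⟨hnd, fun x hx => ?_⟩
      simp [PySem.Set.empty, PySem.Set.contains]
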